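-- pv_equiv track=rewrite | github.com/aburnsy/aoc2023 | src/aoc7/script.py | get_card_frequencies_jokers
-- ===== SOURCE A (Python) =====
-- def get_card_frequencies_jokers(cards: list) -> list:
--     """
--     Return a list of frequencies of each card in the hand.
--     The list should be ordered from most frequent to least frequent.
--     Jokers are wild here, so we should add them to the most frequently encountered card's frequency value.
--     If we only get jokers, return 5.
--     """
--     card_groups = []
--     counted = set()
--     js = 0
--     for card in cards:
--         if card not in counted and card != "J":
--             c = cards.count(card)
--             card_groups.append(c)
--             counted.add(card)
--         if card == "J":
--             js += 1
--     if js == 5:  # edge case - are there any others???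
--         return [5]
--     ranked_card_groups = sorted(card_groups, reverse=True)
--     # best place to add the J will always be the largest group of cards
--     ranked_card_groups[0] += js
--     return ranked_card_groups
-- ===== SOURCE B (Python) =====
-- def get_card_frequencies_jokers(cards: list) -> list:
--     """
--     Return a list of frequencies of each card in the hand, most frequent first,
--     with jokers ('J') added to the largest group; [5] if the hand has exactly 5 jokers.
--     Sort the non-joker cards once, then scan adjacent runs to read off the group sizes.
--     """
--     js = len([c for c in cards if c == "J"])
--     if js == 5:
--         return [5]
--     rest = sorted(c for c in cards if c != "J")
--     runs = []
--     prev = None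
--     run = 0
--     for c in rest:
--         if c == prev:
--             run += 1
--         else:
--             if run:
--                 runs.append(run)
--             prev, run = c, 1
--     if run:
--         runs.append(run)
--     ranked = sorted(runs, reverse=True)
--     ranked[0] += js
--     return ranked
-- ===== Notes on version B (the rewrite author's own statement) =====
-- stated objective: faster
-- what changed: Replaces A's per-new-card cards.count rescans guarded by a 'counted' set with a sort of the non-joker cards followed by one adjacent-run scan that reads the group sizes off consecutive equal cards.
import Mathlib
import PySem

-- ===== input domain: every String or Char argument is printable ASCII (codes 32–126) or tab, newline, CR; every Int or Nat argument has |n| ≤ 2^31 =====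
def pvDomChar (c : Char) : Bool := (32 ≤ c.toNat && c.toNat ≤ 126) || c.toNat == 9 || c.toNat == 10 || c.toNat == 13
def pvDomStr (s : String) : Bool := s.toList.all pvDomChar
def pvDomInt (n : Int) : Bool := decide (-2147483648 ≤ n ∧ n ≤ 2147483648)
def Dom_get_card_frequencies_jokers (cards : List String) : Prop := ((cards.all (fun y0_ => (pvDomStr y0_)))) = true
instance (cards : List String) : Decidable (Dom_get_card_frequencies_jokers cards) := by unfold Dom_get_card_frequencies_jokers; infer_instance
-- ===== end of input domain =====

-- B sorts the non-joker cards and reads the group sizes off an adjacent-run scan, instead of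
-- A's per-new-card cards.count rescans guarded by a 'counted' set; the return values agree on Pre_.

-- ===== PORT A =====
-- the body of A's 'for card in cards' loop; 'full' is the whole list 'cards' that cards.count reads
def stepA (full : List String) (st : List Int × PySem.Set String × Int) (card : String) :
    List Int × PySem.Set String × Int :=
  let (g, counted, js) := st
  let (g, counted) :=
    if ¬ PySem.Set.contains counted card ∧ card ≠ "J" then
      (g ++ [(PySem.List.count full card : Int)], PySem.Set.add counted card)
    else (g, counted)
  let js := if card = "J" then js + 1 else js
  (g, counted, js)

def get_card_frequencies_jokers (cards : List String) : List Int :=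
  let st := cards.foldl (stepA cards) ([], PySem.Set.empty, 0)
  let (card_groups, _, js) := st
  if js = 5 then [5]
  else
    match PySem.List.sorted card_groups (fun x => x) true with
    | [] => []  -- Python raises IndexError here; excluded by Pre_
    | h :: t => (h + js) :: t

-- ===== PORT B =====
-- the body of B's 'for c in rest' loop: state (runs, prev, run)
def stepB (st : List Int × Option String × Int) (c : String) :
    List Int × Option String × Int :=
  let (runs, prev, run) := st
  if some c = prev then (runs, prev, run + 1)
  else ((if run ≠ 0 then runs ++ [run] else runs), some c, 1)

def get_card_frequencies_jokers_alt (cards : List String) : List Int :=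
  let js : Int := ((cards.filter (fun c => c == "J")).length : Int)
  if js = 5 then [5]
  else
    let rest := PySem.List.sorted (cards.filter (fun c => c != "J")) (fun x => x) false
    let st := rest.foldl stepB ([], none, 0)
    let runs := if st.2.2 ≠ 0 then st.1 ++ [st.2.2] else st.1
    match PySem.List.sorted runs (fun x => x) true with
    | [] => []  -- Python raises IndexError here; excluded by Pre_
    | h :: t => (h + js) :: t

-- ===== PRECONDITION & SPEC =====
-- Pre_ excludes exactly the inputs where A raises IndexError (B raises it there too): a hand
-- with no non-'J' card whose 'J'-count is not 5 (card_groups is then empty and ranked_card_groups[0] fails).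
def Pre_get_card_frequencies_jokers (cards : List String) : Prop :=
  (∃ c ∈ cards, c ≠ "J") ∨ cards.count "J" = 5
instance (cards : List String) : Decidable (Pre_get_card_frequencies_jokers cards) := by
  unfold Pre_get_card_frequencies_jokers; infer_instance
def pvWitness_get_card_frequencies_jokers : List String := ["A", "A", "J", "2", "3"]

def Spec_get_card_frequencies_jokers (cards : List String) (out : List Int) : Prop := out = get_card_frequencies_jokers_alt cards
instance (cards : List String) (out : List Int) : Decidable (Spec_get_card_frequencies_jokers cards out) := by unfold Spec_get_card_frequencies_jokers; infer_instance

-- ===== CLAIM (what is proved, stated in full; the proofs are below) =====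
def Claim_equal_get_card_frequencies_jokers : Prop := ∀ (cards : List String), Dom_get_card_frequencies_jokers cards → Pre_get_card_frequencies_jokers cards → Spec_get_card_frequencies_jokers cards (get_card_frequencies_jokers cards)

-- ===== LEMMAS AND PROOFS =====

theorem set_update_cons {α : Type} [BEq α] (s : PySem.Set α) (x : α) (l : List α) :
    PySem.Set.update s (x :: l) = PySem.Set.update (PySem.Set.add s x) l := rfl

theorem set_add_of_contains {α : Type} [BEq α] (s : PySem.Set α) (x : α)
    (hc : PySem.Set.contains s x = true) : PySem.Set.add s x = s := by
  unfold PySem.Set.add; rw [hc]; rfl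

theorem set_add_of_not_contains {α : Type} [BEq α] (s : PySem.Set α) (x : α)
    (hc : PySem.Set.contains s x = false) : PySem.Set.add s x = s ++ [x] := by
  unfold PySem.Set.add; rw [hc]; rfl

-- Set.update only ever appends to the set
theorem set_update_prefix {α : Type} [BEq α] (l : List α) :
    ∀ (s : PySem.Set α), ∃ t, PySem.Set.update s l = s ++ t := by
  induction l with
  | nil => intro s; exact ⟨[], by simp [PySem.Set.update]⟩
  | cons x r ih =>
    intro s
    rw [set_update_cons]
    by_cases hc : PySem.Set.contains s x = true
    · rw [set_add_of_contains s x hc]; exact ih s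
    · rw [set_add_of_not_contains s x (by simpa using hc)]
      obtain ⟨t, ht⟩ := ih (s ++ [x])
      exact ⟨x :: t, by rw [ht, List.append_assoc]; rfl⟩

-- invariant of A's loop: groups are the counts of the newly seen non-'J' cards in first-occurrence
-- order, 'counted' is the set updated with the non-'J' cards, js accumulates the 'J'-count
theorem loopA_inv (full : List String) :
    ∀ (l : List String) (g : List Int) (s : PySem.Set String) (j : Int),
      l.foldl (stepA full) (g, s, j) =
        (g ++ ((PySem.Set.update s (l.filter (fun c => c != "J"))).drop s.length).map
            (fun c => (PySem.List.count full c : Int)),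
         PySem.Set.update s (l.filter (fun c => c != "J")),
         j + (l.count "J" : Int)) := by
  intro l
  induction l with
  | nil =>
    intro g s j
    simp [PySem.Set.update]
  | cons card r ih =>
    intro g s j
    rw [List.foldl_cons]
    by_cases hJ : card = "J"
    · subst hJ
      have h1 : stepA full (g, s, j) "J" = (g, s, j + 1) := by
        simp [stepA]
      rw [h1, ih]
      have hf : List.filter (fun c => c != "J") ("J" :: r) = List.filter (fun c => c != "J") r := by
        simp
      rw [hf]
      simp [Prod.ext_iff]
      ring
    · have hJ' : (card != "J") = true := by simpa using hJ
      have hf : List.filter (fun c => c != "J") (card :: r) = card :: List.filter (fun c => c != "J") r := by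
        simp [hJ']
      by_cases hc : PySem.Set.contains s card = true
      · have hm : card ∈ s := by simpa using hc
        have h1 : stepA full (g, s, j) card = (g, s, j) := by
          simp [stepA, hm, hJ]
        rw [h1, ih, hf, set_update_cons, set_add_of_contains s card hc]
        simp [hJ]
      · have hc' : PySem.Set.contains s card = false := by simpa using hc
        have h1 : stepA full (g, s, j) card =
            (g ++ [(PySem.List.count full card : Int)], PySem.Set.add s card, j) := by
          have hm : card ∉ s := by simpa using hc
          simp [stepA, hm, hJ]
        rw [h1, ih, hf, set_update_cons, set_add_of_not_contains s card hc']
        obtain ⟨t, ht⟩ := set_update_prefix (r.filter (fun c => c != "J")) (s ++ [card])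
        rw [ht]
        simp [hJ, List.append_assoc]

-- proof-side first-occurrence dedup whose spine matches the run scan on a sorted list
def pvDedup : List String → List String
  | [] => []
  | c :: t => c :: pvDedup (t.filter (fun x => x != c))
termination_by l => l.length
decreasing_by
  simp only [List.length_unattach, List.length_cons]
  exact Nat.lt_succ_of_le (le_trans (List.length_filter_le _ _) (le_of_eq (by simp)))

theorem pvDedup_nil : pvDedup [] = [] := by simp [pvDedup]

theorem pvDedup_cons (c : String) (t : List String) :
    pvDedup (c :: t) = c :: pvDedup (t.filter (fun x => x != c)) := by
  rw [pvDedup]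

theorem pvDedup_mem : ∀ (l : List String) (x : String), x ∈ pvDedup l ↔ x ∈ l := by
  intro l
  induction l using pvDedup.induct with
  | case1 => intro x; simp [pvDedup_nil]
  | case2 c t ih =>
    simp only [List.unattach_filter, List.unattach_attach] at ih
    intro x
    by_cases hx : x = c
    · subst hx; simp [pvDedup_cons]
    · simp [pvDedup_cons, ih, hx, List.mem_filter]

theorem pvDedup_nodup : ∀ (l : List String), (pvDedup l).Nodup := by
  intro l
  induction l using pvDedup.induct with
  | case1 => simp [pvDedup_nil]
  | case2 c t ih =>
    simp only [List.unattach_filter, List.unattach_attach] at ih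
    rw [pvDedup_cons]
    refine List.nodup_cons.mpr ⟨fun hm => ?_, ih⟩
    have := (pvDedup_mem _ c).mp hm
    simp [List.mem_filter] at this

theorem cnt_self (c : String) (t : List String) :
    ((c :: t).count c : Int) = (t.count c : Int) + 1 := by
  simp

-- invariant of B's run scan on a sorted tail whose elements are all ≥ the open run's value
theorem loopB_inv :
    ∀ (t : List String) (runs : List Int) (p : String) (k : Int),
      t.Pairwise (· ≤ ·) → (∀ x ∈ t, p ≤ x) → 0 < k →
      (let st := t.foldl stepB (runs, some p, k)
       if st.2.2 ≠ 0 then st.1 ++ [st.2.2] else st.1) =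
        runs ++ (k + (t.count p : Int)) ::
          (pvDedup (t.filter (fun x => x != p))).map (fun c => (t.count c : Int)) := by
  intro t
  induction t with
  | nil =>
    intro runs p k _ _ hk
    simp [pvDedup_nil, (show k ≠ 0 by omega)]
  | cons c t' ih =>
    intro runs p k hpw hge hk
    have hpw' : t'.Pairwise (· ≤ ·) := hpw.of_cons
    have hct' : ∀ x ∈ t', c ≤ x := fun x hx => (List.pairwise_cons.mp hpw).1 x hx
    by_cases hc : c = p
    · subst hc
      have h1 : stepB (runs, some c, k) c = (runs, some c, k + 1) := by simp [stepB]
      simp only [List.foldl_cons, h1]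
      rw [ih runs c (k + 1) hpw' hct' (by omega)]
      have hfil : (c :: t').filter (fun x => x != c) = t'.filter (fun x => x != c) := by simp
      rw [hfil, cnt_self]
      congr 1
      refine List.cons_eq_cons.mpr ⟨by ring, ?_⟩
      apply List.map_congr_left
      intro x hx
      have hxne : x ≠ c := by
        have := List.mem_filter.mp ((pvDedup_mem _ x).mp hx)
        simpa using this.2
      simp [Ne.symm hxne]
    · have hlt : p < c := lt_of_le_of_ne (hge c (by simp)) (fun h => hc h.symm)
      have h1 : stepB (runs, some p, k) c = (runs ++ [k], some c, 1) := by
        have hne : some c ≠ some p := by simpa using hc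
        simp [stepB, hne, (show k ≠ 0 by omega)]
      simp only [List.foldl_cons, h1]
      rw [ih (runs ++ [k]) c 1 hpw' hct' one_pos]
      have hpnot : p ∉ c :: t' := by
        intro hm
        rcases List.mem_cons.mp hm with h | h
        · exact hc h.symm
        · exact absurd (hct' p h) (not_le.mpr hlt)
      have hfil : (c :: t').filter (fun x => x != p) = c :: t' := by
        apply List.filter_eq_self.mpr
        intro x hx
        simp only [bne_iff_ne, ne_eq]
        intro he; exact hpnot (he ▸ hx)
      rw [hfil, pvDedup_cons]
      rw [show ((c :: t').count p : Int) = 0 from by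
        simp [List.count_eq_zero_of_not_mem hpnot], add_zero]
      simp only [List.map_cons, List.append_assoc, List.cons_append, List.nil_append]
      rw [cnt_self]
      congr 1
      refine List.cons_eq_cons.mpr ⟨rfl, ?_⟩
      refine List.cons_eq_cons.mpr ⟨by ring, ?_⟩
      apply List.map_congr_left
      intro x hx
      have hxne : x ≠ c := by
        have := List.mem_filter.mp ((pvDedup_mem _ x).mp hx)
        simpa using this.2
      simp [Ne.symm hxne]

-- B's finished runs list is the per-distinct-card count list of the sorted rest
theorem runs_eq (rest : List String) (hpw : rest.Pairwise (· ≤ ·)) :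
    (let st := rest.foldl stepB ([], none, 0)
     if st.2.2 ≠ 0 then st.1 ++ [st.2.2] else st.1) =
      (pvDedup rest).map (fun c => (rest.count c : Int)) := by
  cases rest with
  | nil => simp [pvDedup_nil]
  | cons c t =>
    have h1 : stepB ([], none, 0) c = ([], some c, 1) := by simp [stepB]
    have hpw' : t.Pairwise (· ≤ ·) := hpw.of_cons
    have hct : ∀ x ∈ t, c ≤ x := fun x hx => (List.pairwise_cons.mp hpw).1 x hx
    simp only [List.foldl_cons, h1]
    rw [loopB_inv t [] c 1 hpw' hct one_pos, pvDedup_cons]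
    simp only [List.map_cons, List.nil_append]
    rw [cnt_self]
    refine List.cons_eq_cons.mpr ⟨by ring, ?_⟩
    apply List.map_congr_left
    intro x hx
    have hxne : x ≠ c := by
      have := List.mem_filter.mp ((pvDedup_mem _ x).mp hx)
      simpa using this.2
    simp [Ne.symm hxne]

-- descending sorts of permutation-equal Int lists coincide
theorem sorted_rev_eq_of_perm (xs ys : List Int) (hp : xs.Perm ys) :
    PySem.List.sorted xs (fun x => x) true = PySem.List.sorted ys (fun x => x) true := by
  apply PySem.List.eq_of_perm_of_pairwise_le_of_injective (key := fun x : Int => -x)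
    (fun a b h => by simpa using h)
  · exact (PySem.List.sorted_perm xs _ true).trans (hp.trans (PySem.List.sorted_perm ys _ true).symm)
  · have := PySem.List.sorted_pairwise_rev xs (fun x => x)
    exact this.imp (by intro a b h; simpa using h)
  · have := PySem.List.sorted_pairwise_rev ys (fun x => x)
    exact this.imp (by intro a b h; simpa using h)

-- A's card_groups and B's finished runs are permutation-equal lists of Ints
theorem groups_perm_runs (cards : List String) :
    (cards.foldl (stepA cards) ([], PySem.Set.empty, 0)).1.Perm
      (let rest := PySem.List.sorted (cards.filter (fun c => c != "J")) (fun x => x) false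
       let st := rest.foldl stepB ([], none, 0)
       if st.2.2 ≠ 0 then st.1 ++ [st.2.2] else st.1) := by
  set fil := cards.filter (fun c : String => c != "J") with hfil
  set rest := PySem.List.sorted fil (fun x => x) false with hrest
  have hA : (cards.foldl (stepA cards) ([], PySem.Set.empty, 0)).1 =
      (PySem.Set.ofList fil).map (fun c => (PySem.List.count cards c : Int)) := by
    rw [loopA_inv cards cards [] PySem.Set.empty 0]
    simp only [PySem.Set.empty, List.length_nil, List.drop_zero, List.nil_append]
    rfl
  have hpwrest : rest.Pairwise (· ≤ ·) := PySem.List.sorted_pairwise fil (fun x : String => x)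
  have hB := runs_eq rest hpwrest
  rw [hA]
  have hrfil : rest.Perm fil := PySem.List.sorted_perm fil _ false
  have hmapA : (PySem.Set.ofList fil).map (fun c => (PySem.List.count cards c : Int)) =
      (PySem.Set.ofList fil).map (fun c => (rest.count c : Int)) := by
    apply List.map_congr_left
    intro c hm
    have hmf : c ∈ fil := (PySem.Set.mem_ofList _ _).mp hm
    have hne : (c != "J") = true := (List.mem_filter.mp hmf).2
    have h1 : cards.count c = fil.count c := by
      rw [hfil, List.count_filter]
      simp
      intro h; subst h; simp at hne
    rw [PySem.List.count_eq, h1, hrfil.count_eq]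
  rw [hmapA, hB]
  exact ((List.perm_ext_iff_of_nodup (PySem.Set.nodup_ofList fil) (pvDedup_nodup rest)).mpr
    (fun x => by rw [PySem.Set.mem_ofList, pvDedup_mem]; exact hrfil.mem_iff.symm)).map
    (fun c => (rest.count c : Int))

-- ===== VERDICT (by name: the statement is the Claim_ definition above) =====
theorem get_card_frequencies_jokers_spec : Claim_equal_get_card_frequencies_jokers := by
  intro cards _ _
  unfold Spec_get_card_frequencies_jokers
  simp only [get_card_frequencies_jokers, get_card_frequencies_jokers_alt]
  have hjs : (cards.foldl (stepA cards) ([], PySem.Set.empty, 0)).2.2 =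
      ((cards.filter (fun c => c == "J")).length : Int) := by
    rw [loopA_inv cards cards [] PySem.Set.empty 0]
    simp [List.count_eq_countP, List.countP_eq_length_filter]
  have hsort := sorted_rev_eq_of_perm _ _ (groups_perm_runs cards)
  rcases hA : cards.foldl (stepA cards) ([], PySem.Set.empty, 0) with ⟨g, s, j⟩
  rw [hA] at hjs hsort
  simp only at hjs hsort
  rw [← hjs]
  by_cases h5 : j = 5
  · simp [h5]
  · simp only [h5, if_false]
    rw [hsort]
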